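-- pv_equiv track=rewrite | github.com/kskoczyk/NeuralNetwork | RunNeuralNetwork.py | switchYearPeriod
-- ===== SOURCE A (Python) =====
-- import math
--
-- def isNumber(s):
--     try:
--         float(s)
--         return True
--     except ValueError:
--         return False
--
-- def switchYearPeriod(year, first, last, period):
--     yearList = []
--
--     firstYear = first
--     lastYear = last
--     periodRange = period  # how many years in one period
--     noPeriods = math.ceil((lastYear - firstYear + 1) / periodRange)
--
--     if (not isNumber(year)) or (not firstYear <= int(year) <= lastYear):  # N/A or outside the range cases
--         residue = -1
--     else:
--         residue = int(year) % firstYear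
--
--     appended = False
--     for i in range(0, noPeriods):
--         if (not appended) and (i * periodRange <= residue <= (i + 1) * periodRange - 1):
--             yearList.append(1)
--             appended = True
--         else:
--             yearList.append(0)
--     return yearList
-- ===== SOURCE B (Python) =====
-- def switchYearPeriod(year, first, last, period):
--     # ceil((last-first+1)/period) via integer floor division
--     noPeriods = -((-(last - first + 1)) // period)
--     n = noPeriods if noPeriods > 0 else 0
--     out = [0] * n
--     try:
--         v = int(year)
--     except ValueError:
--         return out
--     if first <= v <= last:
--         idx = (v % first) // period
--         if 0 <= idx < n:
--             out[idx] = 1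
--     return out
-- ===== Notes on version B (the rewrite author's own statement) =====
-- stated objective: simpler
-- what changed: B drops A's flagged scan that tests every period's interval against the residue and instead builds the zero list once and directly writes the single 1 at index residue // period (guarded to lie in range), computing the ceiling with integer floor division and using try/except around int(year) instead of the isNumber float probe.
import Mathlib
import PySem

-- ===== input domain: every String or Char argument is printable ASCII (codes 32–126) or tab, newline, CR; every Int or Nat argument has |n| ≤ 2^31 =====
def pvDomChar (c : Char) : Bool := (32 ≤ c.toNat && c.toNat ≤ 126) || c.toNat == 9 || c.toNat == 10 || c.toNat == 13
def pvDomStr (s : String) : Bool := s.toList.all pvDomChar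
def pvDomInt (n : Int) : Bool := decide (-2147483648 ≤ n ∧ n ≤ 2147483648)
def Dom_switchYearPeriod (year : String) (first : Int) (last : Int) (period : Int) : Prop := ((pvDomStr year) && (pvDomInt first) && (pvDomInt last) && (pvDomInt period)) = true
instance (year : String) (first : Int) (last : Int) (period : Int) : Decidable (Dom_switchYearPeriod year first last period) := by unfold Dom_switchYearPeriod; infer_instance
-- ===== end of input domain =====

-- B replaces A's scan over all periods (flag + per-period interval test) by directly
-- placing the single 1 at index residue // period in a zero list (objective: simpler).

-- ===== PORT A =====
-- math.ceil((last-first+1)/period) on Dom's |n| ≤ 2^31 ints equals the exact integer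
-- ceiling -((-(last-first+1)) // period): the float quotient's rounding error (< 2^-20/|period|)
-- is smaller than the gap (≥ 1/|period|) between the exact quotient and any other integer.
-- A's "isNumber(year) and int(year) succeeds" is PySem.Int.ofStr? year = some v: exact on
-- Pre_, which excludes the float-parsable-but-not-int-parsable strings where int(year) raises.
def switchYearPeriod (year : String) (first : Int) (last : Int) (period : Int) : List Int :=
  let noPeriods : Int := -(PySem.Int.floordiv (-(last - first + 1)) period)
  let residue : Int :=
    match PySem.Int.ofStr? year with
    | none => -1
    | some v => if first ≤ v ∧ v ≤ last then PySem.Int.mod v first else -1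
  ((PySem.List.pyRange 0 noPeriods 1).foldl
    (fun (st : List Int × Bool) i =>
      if !st.2 && decide (i * period ≤ residue ∧ residue ≤ (i + 1) * period - 1)
      then (st.1 ++ [1], true)
      else (st.1 ++ [0], st.2))
    ([], false)).1

-- ===== PORT B =====
def switchYearPeriod_alt (year : String) (first : Int) (last : Int) (period : Int) : List Int :=
  let noPeriods : Int := -(PySem.Int.floordiv (-(last - first + 1)) period)
  let out : List Int := List.replicate noPeriods.toNat 0   -- [0] * max(noPeriods, 0)
  match PySem.Int.ofStr? year with
  | none => out
  | some v =>
    if first ≤ v ∧ v ≤ last then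
      let idx := PySem.Int.floordiv (PySem.Int.mod v first) period
      if 0 ≤ idx ∧ idx < noPeriods then out.set idx.toNat 1 else out
    else out

-- ===== PRECONDITION & SPEC =====
-- pvIsPyFloat: does Python's float(s) accept s (ASCII)? strip whitespace, optional sign,
-- then inf/infinity/nan (case-insensitive) or mantissa[e-exponent] with digits that may
-- carry single underscores between digits.
def pvIsWS (c : Char) : Bool := c == ' ' || c == '\t' || c == '\n' || c == '\r'

def pvDigitsTail : List Char → Bool
  | [] => true
  | '_' :: c :: cs => c.isDigit && pvDigitsTail cs
  | c :: cs => c.isDigit && pvDigitsTail cs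

def pvDigitsU : List Char → Bool
  | [] => false
  | c :: cs => c.isDigit && pvDigitsTail cs

def pvMant (m : List Char) : Bool :=
  match m.splitOn '.' with
  | [d] => pvDigitsU d
  | [a, b] => (pvDigitsU a || a.isEmpty) && (pvDigitsU b || b.isEmpty) && !(a.isEmpty && b.isEmpty)
  | _ => false

def pvExpo : List Char → Bool
  | [] => false
  | c :: cs => if c == '+' || c == '-' then pvDigitsU cs else pvDigitsU (c :: cs)

def pvIsPyFloat (s : String) : Bool :=
  let l0 := ((s.toList.map Char.toLower).dropWhile pvIsWS).reverse.dropWhile pvIsWS |>.reverse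
  let l := match l0 with
           | c :: cs => if c == '+' || c == '-' then cs else c :: cs
           | [] => []
  if l = "inf".toList || l = "infinity".toList || l = "nan".toList then true
  else match l.splitOn 'e' with
  | [m] => pvMant m
  | [m, e] => pvMant m && pvExpo e
  | _ => false

-- the year-in-range branch divides by `first`; safe unless first = 0 and the branch is taken
def pvZeroSafe (year : String) (first : Int) (last : Int) : Bool :=
  match PySem.Int.ofStr? year with
  | some v => !(decide (first ≤ v ∧ v ≤ last)) || decide (first ≠ 0)
  | none => true

-- Pre_ excludes exactly the inputs where A raises: period = 0 (ZeroDivisionError in the ceil),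
-- year float-parsable but not int-parsable (int(year) raises ValueError), and first = 0 with
-- int(year) in [first, last] (ZeroDivisionError in int(year) % first).
def Pre_switchYearPeriod (year : String) (first : Int) (last : Int) (period : Int) : Prop :=
  period ≠ 0 ∧
  (PySem.Int.ofStr? year = none → pvIsPyFloat year = false) ∧
  pvZeroSafe year first last = true
instance (year : String) (first : Int) (last : Int) (period : Int) : Decidable (Pre_switchYearPeriod year first last period) := by unfold Pre_switchYearPeriod; infer_instance

def pvWitness_switchYearPeriod : String × Int × Int × Int := ("5", 1, 10, 3)

def Spec_switchYearPeriod (year : String) (first : Int) (last : Int) (period : Int) (out : List Int) : Prop := out = switchYearPeriod_alt year first last period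
instance (year : String) (first : Int) (last : Int) (period : Int) (out : List Int) : Decidable (Spec_switchYearPeriod year first last period out) := by unfold Spec_switchYearPeriod; infer_instance

-- ===== CLAIM (what is proved, stated in full; the proofs are below) =====
def Claim_equal_switchYearPeriod : Prop := ∀ (year : String) (first : Int) (last : Int) (period : Int), Dom_switchYearPeriod year first last period → Pre_switchYearPeriod year first last period → Spec_switchYearPeriod year first last period (switchYearPeriod year first last period)

-- ===== LEMMAS AND PROOFS =====

-- A's loop once the flag is set: only zeros are appended
theorem pv_foldl_flagged (cond : Int → Bool) (l : List Int) (acc : List Int) :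
    l.foldl
      (fun (st : List Int × Bool) i =>
        if !st.2 && cond i then (st.1 ++ [1], true) else (st.1 ++ [0], st.2))
      (acc, true) = (acc ++ List.replicate l.length 0, true) := by
  induction l generalizing acc with
  | nil => simp
  | cons a l ih =>
    simp only [List.foldl_cons, Bool.not_true, Bool.false_and, Bool.false_eq_true,
      if_false]
    rw [ih]
    simp [List.replicate_succ, List.append_assoc]

-- A's loop when no element satisfies the test: all zeros, flag stays down
theorem pv_foldl_miss (cond : Int → Bool) (l : List Int) (acc : List Int)
    (h : ∀ i ∈ l, cond i = false) :
    l.foldl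
      (fun (st : List Int × Bool) i =>
        if !st.2 && cond i then (st.1 ++ [1], true) else (st.1 ++ [0], st.2))
      (acc, false) = (acc ++ List.replicate l.length 0, false) := by
  induction l generalizing acc with
  | nil => simp
  | cons a l ih =>
    have ha : cond a = false := h a (by simp)
    simp only [List.foldl_cons, ha, Bool.and_false, Bool.false_eq_true, if_false]
    rw [ih _ (fun i hi => h i (by simp [hi]))]
    simp [List.replicate_succ, List.append_assoc]

-- writing the single 1 into a zero list
theorem pv_set_replicate (n k : Nat) (h : k < n) :
    (List.replicate n (0 : Int)).set k 1
      = List.replicate k 0 ++ [1] ++ List.replicate (n - k - 1) 0 := by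
  induction n generalizing k with
  | zero => omega
  | succ n ih =>
    cases k with
    | zero => simp [List.replicate_succ]
    | succ k =>
      simp only [List.replicate_succ, List.set_cons_succ, ih k (by omega)]
      simp [List.append_assoc]

-- the interval test of A's loop is exactly "i is the floor quotient" when period ≥ 1
theorem pv_cond_iff (p r i : Int) (hp : 0 < p) :
    (i * p ≤ r ∧ r ≤ (i + 1) * p - 1) ↔ PySem.Int.floordiv r p = i := by
  rw [PySem.Int.floordiv_eq_iff_of_pos (a := r) (b := p) (q := i) hp]
  omega

-- ceiling division of a positive numerator by a negative divisor is non-positive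
theorem pv_ceil_nonpos (a p : Int) (ha : 1 ≤ a) (hp : p ≤ -1) :
    -(PySem.Int.floordiv (-a) p) ≤ 0 := by
  have hmod := PySem.Int.floordiv_mul_add_mod (-a) p
  have hbd := PySem.Int.mod_neg_bounds (-a) (b := p) (by omega)
  set q := PySem.Int.floordiv (-a) p with hq
  by_contra hcon
  have hqneg : q ≤ -1 := by omega
  nlinarith [hmod, hbd.1, hbd.2]

-- the range(0, N) scan with residue = -1 (or any condition that never fires) is all zeros
theorem pv_scan_miss (p r N : Int)
    (h : ∀ i : Int, 0 ≤ i → i < N → ¬ (i * p ≤ r ∧ r ≤ (i + 1) * p - 1)) :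
    ((PySem.List.pyRange 0 N 1).foldl
      (fun (st : List Int × Bool) i =>
        if !st.2 && decide (i * p ≤ r ∧ r ≤ (i + 1) * p - 1)
        then (st.1 ++ [1], true) else (st.1 ++ [0], st.2))
      ([], false)).1 = List.replicate N.toNat 0 := by
  rw [pv_foldl_miss]
  · simp [PySem.List.length_pyRange_one]
  · intro i hi
    have hm := (PySem.List.mem_pyRange_one).1 hi
    simpa using h i hm.1 hm.2

-- no period interval can contain a negative residue (for any sign of p, given i ≥ 0)
theorem pv_neg_residue_miss (p r i : Int) (hr : r < 0) (hi : 0 ≤ i) :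
    ¬ (i * p ≤ r ∧ r ≤ (i + 1) * p - 1) := by
  rintro ⟨h1, h2⟩
  rcases lt_trichotomy p 0 with hp | hp | hp
  · nlinarith
  · subst hp; simp at h1; omega
  · nlinarith

-- both ports compute the same list whenever period ≠ 0
theorem pv_main (year : String) (first last period : Int) (hp : period ≠ 0) :
    switchYearPeriod year first last period = switchYearPeriod_alt year first last period := by
  unfold switchYearPeriod switchYearPeriod_alt
  set N : Int := -(PySem.Int.floordiv (-(last - first + 1)) period) with hN
  rcases hy : PySem.Int.ofStr? year with _ | v
  · -- int(year) fails: residue = -1, no interval fires, B returns the zero list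
    simp only [hy]
    exact pv_scan_miss period (-1) N (fun i hi _ => pv_neg_residue_miss period (-1) i (by omega) hi)
  · simp only [hy]
    by_cases hrange : first ≤ v ∧ v ≤ last
    · simp only [if_pos hrange]
      set m : Int := PySem.Int.mod v first with hm
      set q : Int := PySem.Int.floordiv m period with hqd
      by_cases hppos : 0 < period
      · -- period ≥ 1: the interval test fires exactly at i = q
        by_cases hguard : 0 ≤ q ∧ q < N
        · -- split range(0, N) at q
          rw [if_pos hguard,
            PySem.List.pyRange_one_append 0 q N hguard.1 (by omega),
            PySem.List.pyRange_one_cons hguard.2, List.foldl_append, List.foldl_cons]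
          rw [pv_foldl_miss _ _ _ ?side1]
          case side1 =>
            intro i hi
            have hm' := (PySem.List.mem_pyRange_one).1 hi
            simp only [decide_eq_false_iff_not]
            intro hc
            have hqi := (pv_cond_iff period m i hppos).1 hc
            rw [← hqd] at hqi
            omega
          have hcondq : decide (q * period ≤ m ∧ m ≤ (q + 1) * period - 1) = true := by
            simp only [decide_eq_true_eq]
            exact (pv_cond_iff period m q hppos).2 hqd.symm
          simp only [Bool.not_false, Bool.true_and, hcondq, if_true]
          rw [pv_foldl_flagged, pv_set_replicate N.toNat q.toNat (by omega)]
          simp only [List.nil_append, PySem.List.length_pyRange_one, List.append_assoc]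
          have h1 : (q - 0).toNat = q.toNat := by omega
          have h2 : (N - (q + 1)).toNat = N.toNat - q.toNat - 1 := by omega
          rw [h1, h2]
        · -- the quotient lands outside range(0, N): nothing fires
          rw [if_neg hguard]
          apply pv_scan_miss
          intro i hi hiN hc
          have hqi := (pv_cond_iff period m i hppos).1 hc
          rw [← hqd] at hqi
          omega
      · -- period ≤ -1: N ≤ 0, both sides are the empty list
        have hNle : N ≤ 0 := pv_ceil_nonpos (last - first + 1) period (by omega) (by omega)
        have hguard : ¬ (0 ≤ q ∧ q < N) := by omega
        rw [if_neg hguard, PySem.List.pyRange_one_eq_nil hNle]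
        simp [Int.toNat_of_nonpos hNle]
    · -- int(year) out of [first, last]: residue = -1 again
      simp only [if_neg hrange]
      exact pv_scan_miss period (-1) N (fun i hi _ => pv_neg_residue_miss period (-1) i (by omega) hi)

-- ===== VERDICT (by name: the statement is the Claim_ definition above) =====
theorem switchYearPeriod_spec : Claim_equal_switchYearPeriod := by
  intro year first last period _ hpre
  exact pv_main year first last period hpre.1
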